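-- pv_equiv track=rewrite | github.com/zzzDavid/CS6120-A13 | search_space.py | gen_var_encoding
-- ===== SOURCE A (Python) =====
-- def gen_var_encoding(h_idx, vars):
--     # encode the choice of input variables
--     # e.g. (h0 ? x1 : x0)
--     #      (h1 ? x2 : (h0 ? x1 : x0))
--     if len(vars) == 1:
--         var_encoding = vars[0]
--     else:
--         n_select = len(vars) - 1
--         rhs = vars[0]
--         for i in range(n_select):
--             cond = f"h{i + h_idx}"
--             lhs = vars[i+1]
--             rhs = f"({cond} ? {lhs} : {rhs})"
--         var_encoding = rhs
--     return var_encoding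
-- ===== SOURCE B (Python) =====
-- def gen_var_encoding(h_idx, xs):
--     # assemble the string in one pass over the reversed tail: each later variable
--     # contributes an opening "(h.. ? var : " (outermost first), then the first
--     # variable, then all the closing parens, joined once.
--     # (second positional parameter is A's 'vars'; renamed, 'vars' shadows a builtin)
--     n = len(xs)
--     if n == 1:
--         return xs[0]
--     opens = [f"(h{n - 2 - k + h_idx} ? {v} : " for k, v in enumerate(reversed(xs[1:]))]
--     return "".join(opens) + xs[0] + ")" * (n - 1)
-- ===== Notes on version B (the rewrite author's own statement) =====
-- stated objective: faster
-- what changed: Replaces A's loop that re-wraps the whole growing string on every iteration with a single pass over the reversed tail emitting the opening fragments, followed by one join and the closing parens.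
import Mathlib
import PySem

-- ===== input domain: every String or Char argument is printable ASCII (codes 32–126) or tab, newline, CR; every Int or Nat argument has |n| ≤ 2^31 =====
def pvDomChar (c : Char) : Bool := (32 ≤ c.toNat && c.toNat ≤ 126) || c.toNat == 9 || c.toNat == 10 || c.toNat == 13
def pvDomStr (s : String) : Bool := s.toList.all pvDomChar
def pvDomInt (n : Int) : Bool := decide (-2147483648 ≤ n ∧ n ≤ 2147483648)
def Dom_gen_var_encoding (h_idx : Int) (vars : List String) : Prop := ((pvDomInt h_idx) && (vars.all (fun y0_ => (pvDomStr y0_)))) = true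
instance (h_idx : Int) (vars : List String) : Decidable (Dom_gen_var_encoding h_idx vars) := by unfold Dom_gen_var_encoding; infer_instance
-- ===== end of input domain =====

-- B replaces A's loop that re-wraps the whole growing string each iteration with one pass over the reversed tail emitting opening fragments, joined once (measured faster at scale).

-- ===== PORT A =====
def gen_var_encoding (h_idx : Int) (vars : List String) : String :=
  if vars.length = 1 then
    PySem.List.pyGetD vars 0 ""           -- vars[0] (in range under Pre_)
  else
    -- n_select = len(vars) - 1; rhs = vars[0]; for i in range(n_select): rhs = "(h{i+h_idx} ? {vars[i+1]} : {rhs})"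
    (PySem.List.pyRange 0 ((vars.length : Int) - 1) 1).foldl
      (fun rhs i =>
        "(h" ++ PySem.Int.toStr (i + h_idx) ++ " ? " ++
          PySem.List.pyGetD vars (i + 1) "" ++ " : " ++ rhs ++ ")")
      (PySem.List.pyGetD vars 0 "")

-- ===== PORT B =====
def gen_var_encoding_alt (h_idx : Int) (xs : List String) : String :=
  -- n = len(xs)
  if (xs.length : Int) = 1 then
    PySem.List.pyGetD xs 0 ""             -- xs[0]
  else
    -- opens = ["(h{n-2-k+h_idx} ? {v} : " for k, v in enumerate(reversed(xs[1:]))]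
    -- "".join(opens) + xs[0] + ")" * (n - 1)
    PySem.Str.join ""
      ((PySem.List.enumerate ((PySem.List.slice xs (some 1) none).reverse) 0).map
        (fun kv => "(h" ++ PySem.Int.toStr ((xs.length : Int) - 2 - kv.1 + h_idx) ++ " ? " ++ kv.2 ++ " : "))
      ++ PySem.List.pyGetD xs 0 ""
      -- ")" * (n-1): hand port of string repetition as a join of replicate (exact for n ≥ 1)
      ++ PySem.Str.join "" (List.replicate ((xs.length : Int) - 1).toNat ")")

-- ===== PRECONDITION & SPEC =====
-- A raises IndexError on the empty list (vars[0]); excluded.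
def Pre_gen_var_encoding (h_idx : Int) (vars : List String) : Prop := vars ≠ []
instance (h_idx : Int) (vars : List String) : Decidable (Pre_gen_var_encoding h_idx vars) := by unfold Pre_gen_var_encoding; infer_instance
def pvWitness_gen_var_encoding : Int × List String := (0, ["x0", "x1", "x2"])

def Spec_gen_var_encoding (h_idx : Int) (vars : List String) (out : String) : Prop := out = gen_var_encoding_alt h_idx vars
instance (h_idx : Int) (vars : List String) (out : String) : Decidable (Spec_gen_var_encoding h_idx vars out) := by unfold Spec_gen_var_encoding; infer_instance

-- ===== CLAIM (what is proved, stated in full; the proofs are below) =====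
def Claim_equal_gen_var_encoding : Prop := ∀ (h_idx : Int) (vars : List String), Dom_gen_var_encoding h_idx vars → Pre_gen_var_encoding h_idx vars → Spec_gen_var_encoding h_idx vars (gen_var_encoding h_idx vars)

-- ===== LEMMAS AND PROOFS =====

-- "".join distributes over cons / append (sep = "")
theorem pv_join_empty_cons (p : String) (ps : List String) :
    PySem.Str.join "" (p :: ps) = p ++ PySem.Str.join "" ps := by
  apply String.toList_injective
  rw [PySem.Str.toList_join]
  simp [PySem.Chars.join, List.intercalate, PySem.Str.toList_join]
  cases ps <;> simp

theorem pv_flatten_intersperse_nil (xs : List (List Char)) :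
    (List.intersperse ([] : List Char) xs).flatten = xs.flatten := by
  induction xs with
  | nil => rfl
  | cons a as ih =>
    cases as with
    | nil => rfl
    | cons b bs => simp_all [List.intersperse]

-- ")" * k  as a join of replicates, peeled on the right
theorem pv_close_succ (k : Nat) :
    PySem.Str.join "" (List.replicate (k + 1) ")") =
      PySem.Str.join "" (List.replicate k ")") ++ ")" := by
  apply String.toList_injective
  simp [PySem.Str.toList_join, PySem.Chars.join, List.intercalate]
  rw [pv_flatten_intersperse_nil, pv_flatten_intersperse_nil]
  simp [List.replicate_succ']

-- enumerate with a shifted start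
theorem pv_enumerate_shift {α : Type} (xs : List α) (s : Int) :
    PySem.List.enumerate xs (s + 1) =
      (PySem.List.enumerate xs s).map (fun p => (p.1 + 1, p.2)) := by
  induction xs generalizing s with
  | nil => simp [PySem.List.enumerate_nil]
  | cons a as ih =>
    rw [PySem.List.enumerate_cons, PySem.List.enumerate_cons, List.map_cons, ih (s + 1)]

-- A's fold over vars = l ++ [x] is one step around the fold over l (for nonempty l).
theorem gen_var_encoding_concat (h_idx : Int) (l : List String) (x : String) (hl : l ≠ []) :
    gen_var_encoding h_idx (l ++ [x]) =
      "(h" ++ PySem.Int.toStr (((l.length : Int) - 1) + h_idx) ++ " ? " ++ x ++ " : " ++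
        gen_var_encoding h_idx l ++ ")" := by
  have hL : 0 < l.length := List.length_pos_iff.mpr hl
  have hfold : ∀ (m : List String), m ≠ [] →
      gen_var_encoding h_idx m =
        (PySem.List.pyRange 0 ((m.length : Int) - 1) 1).foldl
          (fun rhs i =>
            "(h" ++ PySem.Int.toStr (i + h_idx) ++ " ? " ++
              PySem.List.pyGetD m (i + 1) "" ++ " : " ++ rhs ++ ")")
          (PySem.List.pyGetD m 0 "") := by
    intro m hm
    unfold gen_var_encoding
    split_ifs with h1
    · rw [show ((m.length : Int) - 1) = 0 from by omega,
          PySem.List.pyRange_one_eq_nil (le_refl 0), List.foldl_nil]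
    · rfl
  rw [hfold _ (by simp), hfold _ hl]
  have hlen : (((l ++ [x]).length : Int) - 1) = ((l.length : Int) - 1) + 1 := by
    simp
  rw [hlen, PySem.List.pyRange_one_succ_right (show (0:Int) ≤ (l.length:Int) - 1 from by omega), List.foldl_append]
  simp only [List.foldl_cons, List.foldl_nil]
  have hget0 : PySem.List.pyGetD (l ++ [x]) 0 "" = PySem.List.pyGetD l 0 "" := by
    cases l with
    | nil => exact absurd rfl hl
    | cons a as => simp [PySem.List.pyGetD_zero_cons]
  have hgetL : PySem.List.pyGetD (l ++ [x]) (((l.length : Int) - 1) + 1) "" = x := by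
    rw [show ((l.length : Int) - 1) + 1 = (l.length : Int) by omega]
    rw [PySem.List.pyGetD_eq_getElem (l ++ [x]) "" (by omega) (by simp)]
    simp
  rw [hgetL]
  have hcongr :
      (PySem.List.pyRange 0 ((l.length : Int) - 1) 1).foldl
        (fun rhs i =>
          "(h" ++ PySem.Int.toStr (i + h_idx) ++ " ? " ++
            PySem.List.pyGetD (l ++ [x]) (i + 1) "" ++ " : " ++ rhs ++ ")")
        (PySem.List.pyGetD (l ++ [x]) 0 "") =
      (PySem.List.pyRange 0 ((l.length : Int) - 1) 1).foldl
        (fun rhs i =>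
          "(h" ++ PySem.Int.toStr (i + h_idx) ++ " ? " ++
            PySem.List.pyGetD l (i + 1) "" ++ " : " ++ rhs ++ ")")
        (PySem.List.pyGetD l 0 "") := by
    rw [hget0]
    apply PySem.List.foldl_congr_mem
    intro acc i hi
    have hi' := (PySem.List.mem_pyRange_one).mp hi
    have h1 : 0 ≤ i + 1 := by omega
    have h2 : i + 1 < (l.length : Int) := by omega
    rw [PySem.List.pyGetD_eq_getElem (l ++ [x]) "" h1 (by simp; omega),
        PySem.List.pyGetD_eq_getElem l "" h1 (by omega)]
    rw [List.getElem_append_left (by omega)]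
  rw [hcongr]

-- B unfolded to its three joined pieces, for any nonempty list
theorem pv_alt_form (h_idx : Int) (m : List String) (hm : m ≠ []) :
    gen_var_encoding_alt h_idx m =
      PySem.Str.join ""
        ((PySem.List.enumerate ((PySem.List.slice m (some 1) none).reverse) 0).map
          (fun kv => "(h" ++ PySem.Int.toStr ((m.length : Int) - 2 - kv.1 + h_idx) ++ " ? " ++ kv.2 ++ " : "))
      ++ PySem.List.pyGetD m 0 ""
      ++ PySem.Str.join "" (List.replicate ((m.length : Int) - 1).toNat ")") := by
  unfold gen_var_encoding_alt
  split_ifs with h1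
  · obtain ⟨a, rfl⟩ : ∃ a, m = [a] := by
      cases m with
      | nil => exact absurd rfl hm
      | cons a as =>
        cases as with
        | nil => exact ⟨a, rfl⟩
        | cons b bs => simp at h1; omega
    simp [PySem.List.slice_from_one, PySem.List.enumerate_nil,
          PySem.Str.join, PySem.Chars.join, List.intercalate, PySem.List.pyGetD_zero_cons]
  · rfl

-- B on l ++ [x] (l nonempty) is one nesting step around B on l.
theorem gen_var_encoding_alt_concat (h_idx : Int) (l : List String) (x : String) (hl : l ≠ []) :
    gen_var_encoding_alt h_idx (l ++ [x]) =
      "(h" ++ PySem.Int.toStr (((l.length : Int) - 1) + h_idx) ++ " ? " ++ x ++ " : " ++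
        gen_var_encoding_alt h_idx l ++ ")" := by
  have hL : 0 < l.length := List.length_pos_iff.mpr hl
  rw [pv_alt_form h_idx (l ++ [x]) (by simp), pv_alt_form h_idx l hl]
  -- the reversed tail of l ++ [x] is x followed by the reversed tail of l
  have htail : (PySem.List.slice (l ++ [x]) (some 1) none).reverse =
      x :: (PySem.List.slice l (some 1) none).reverse := by
    rw [PySem.List.slice_from_one, PySem.List.slice_from_one]
    cases l with
    | nil => exact absurd rfl hl
    | cons a as => simp
  rw [htail, PySem.List.enumerate_cons, List.map_cons, pv_join_empty_cons]
  -- the shifted-start enumeration re-indexes to the smaller list's fragments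
  rw [show (0 : Int) + 1 = 0 + 1 from rfl, pv_enumerate_shift, List.map_map]
  have hmap :
      ((fun kv : Int × String =>
          "(h" ++ PySem.Int.toStr (((l ++ [x]).length : Int) - 2 - kv.1 + h_idx) ++ " ? " ++ kv.2 ++ " : ")
        ∘ (fun p : Int × String => (p.1 + 1, p.2))) =
      (fun kv : Int × String =>
          "(h" ++ PySem.Int.toStr ((l.length : Int) - 2 - kv.1 + h_idx) ++ " ? " ++ kv.2 ++ " : ") := by
    funext kv
    have h : ((l ++ [x]).length : Int) - 2 - (kv.1 + 1) + h_idx =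
        (l.length : Int) - 2 - kv.1 + h_idx := by simp; omega
    simp only [Function.comp]
    rw [h]
  rw [hmap]
  have hget0 : PySem.List.pyGetD (l ++ [x]) 0 "" = PySem.List.pyGetD l 0 "" := by
    cases l with
    | nil => exact absurd rfl hl
    | cons a as => simp [PySem.List.pyGetD_zero_cons]
  rw [hget0]
  have hclose : (((l ++ [x]).length : Int) - 1).toNat = ((l.length : Int) - 1).toNat + 1 := by
    simp; omega
  rw [hclose, pv_close_succ]
  have hidx : ((l ++ [x]).length : Int) - 2 - 0 + h_idx = ((l.length : Int) - 1) + h_idx := by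
    simp; omega
  rw [hidx]
  simp [String.append_assoc]

-- ===== VERDICT (by name: the statement is the Claim_ definition above) =====
theorem gen_var_encoding_eq_alt (h_idx : Int) (vars : List String) (hne : vars ≠ []) :
    gen_var_encoding h_idx vars = gen_var_encoding_alt h_idx vars := by
  induction vars using List.reverseRecOn with
  | nil => exact absurd rfl hne
  | append_singleton l x ih =>
    cases l with
    | nil =>
      simp [gen_var_encoding, gen_var_encoding_alt]
    | cons a as =>
      rw [gen_var_encoding_concat h_idx _ x (by simp),
          gen_var_encoding_alt_concat h_idx _ x (by simp),
          ih (by simp)]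

theorem gen_var_encoding_spec : Claim_equal_gen_var_encoding := by
  intro h_idx vars _ hpre
  exact gen_var_encoding_eq_alt h_idx vars hpre
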